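/- GENERATED by mk_final_copies.py from the proof of the farm's unit `vorbis_finish_frame.3` (farm:vorbis_finish_frame.3.1: Proof.lean) as the
   re-elaboration sweep compiled it — do not edit. -/
import Asan.CheckWalk
import Vorbis.Spec.Units.vorbis_finish_frame_3

open X86 X86.User Asan Vorbis Vorbis.Spec

set_option maxRecDepth 4000
set_option maxHeartbeats 4000000

namespace Vorbis.Spec.vorbis_finish_frame_3

/-- 32-bit subtraction of two `int`s whose difference is an `int` does not wrap. -/
theorem seg3_toInt_sub (a b : BitVec 32) (h1 : -(2 ^ 31 : Int) ≤ a.toInt - b.toInt) (h2 : a.toInt - b.toInt < 2 ^ 31) :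
    (a - b).toInt = a.toInt - b.toInt := by
  rw [BitVec.toInt_sub]
  simp only [Int.bmod_def]
  omega

/-- The dword pattern of a 32-bit value reads as its signed value. -/
theorem seg3_sint32_toNat (x : BitVec 32) : sint32 x.toNat = x.toInt := by
  have := x.isLt
  unfold sint32
  rw [BitVec.toInt_eq_toNat_cond]
  split <;> split <;> omega

end Vorbis.Spec.vorbis_finish_frame_3

/-- Segment 3 of `vorbis_finish_frame` (`at_1071ae` … `cut4`, 14 instructions, one check site; stb_vorbis_fixed.c 3507–3518:
`prev = f->previous_length; f->previous_length = len − right; for (i = 0; i < f->channels; ++i) for (j = 0; …`), from the assertion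
`AtPrevJoin` at the join to the assertion `AtSave 0 0` at the head of the flattened saving loop. -/
theorem Vorbis.Spec.Worked.vorbis_finish_frame_3_ok : Vorbis.Spec.vorbis_finish_frame_3.Statement := by
  intro Lay hLay μ hμ u₀ hcode hload4 others frames len A stored room ysz u ret f s hat
  -- the entry state's facts, from the assertion
  have he := hat.frame.entry
  have he0 := he
  have hsh := hat.frame.shadow
  have hr := hat.frame.rdi
  have hfp := hat.frame.fin
  have hinv0 := hat.frame.inv0
  v_entry he
  have hsp := hsh.rsp
  have hwhere := hinv0.objLive.where_ hsh.inv hsh.offText (by simp only [Vorbis.Off.sizeof.stb_vorbis]; omega)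
  simp only [Vorbis.Off.sizeof.stb_vorbis] at hwhere
  have hfa : (addr f).toNat = f := toNat_addr f (by omega)
  -- `*f` lies in the arena (the footprint of the contract)
  have har : A.B ≤ f ∧ f + 1808 ≤ A.B + A.L := by
    have hbr := hinv0.arena.block_range (p := f) (n := Off.sizeof.stb_vorbis) hinv0.obj
    have hl := le_r8 Off.sizeof.stb_vorbis
    have h2 := hinv0.arena.AR2
    simp only [Vorbis.Off.sizeof.stb_vorbis] at hbr hl
    omega
  obtain ⟨j_rip, hfr, hinv, hobj⟩ := hat
  obtain ⟨_, _, _, _, _, j_rsp, j_rbx, j_eq, habi, hs0, hs1, hs2, hs3, hs4, hs5, hs6, hlen, hright, hleft, hsame, hun, hacc⟩ := hfr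
  have hdf : s.flags .df = false := habi.1
  have hmx : s.mxcsr &&& 0x1F80 = 0x1F80 := habi.2
  have w_rip := j_rip
  have w_eq := j_eq
  -- the two fields of `*f` the segment loads
  obtain ⟨pl, rpl⟩ : ∃ pl, s.mem.readLE (addr f + 1256) 4 = pl := ⟨_, rfl⟩
  obtain ⟨ch, rch⟩ : ∃ ch, s.mem.readLE (addr f + 4) 4 = ch := ⟨_, rfl⟩
  -- HD1 in the present memory: `1 ≤ channels ≤ 16`, as a fact about the dword the code loads (prunes the arm `channels ≤ 0`)
  have hchv : stb_vorbis.channels s.mem f = sint32 ch := by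
    simp only [vacc, voff]
    unfold Mem.i32 Mem.u32
    rw [← addr_add_lit, rch]
  have hchlt : ch < 2 ^ 32 := by
    rw [← rch]
    exact X86.User.Mem.readLE_lt' _ _ 4
  have hhd1 := (Real.VorbisOK.config hinv.fb.vorbis).header.HD1
  rw [hchv] at hhd1
  have hch : 1 ≤ ch ∧ ch ≤ 16 := by
    unfold sint32 at hhd1
    split at hhd1 <;> omega
  u_walk hcode [hμ.vendor] until [Vorbis.L.vorbis_finish_frame.cut4, Vorbis.L.vorbis_finish_frame.at_107257] span [Vorbis.L.textLo, Vorbis.L.textHi] side (v_side)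
  · -- check 107244H: `f->channels`
    have hun1 : ShadowUntouched s.mem s_107244.mem := by v_untouched
    have hun' : ShadowUntouched u.mem s_107244.mem := Mem.EqOn.trans hun hun1
    refine hinv0.objLive.accSmall hsh.inv hun' _ 4 (by decide) (by u_omega) ?_
    simp only [Vorbis.Off.sizeof.stb_vorbis]
    u_omega
  · -- the arm `channels ≤ 0` is dead (HD1)
    exfalso
    have hci : (BitVec.ofNat 32 ch).toInt = (ch : Int) := by
      rw [BitVec.toInt_eq_toNat_cond, BitVec.toNat_ofNat]
      split <;> omega
    rw [hci] at hbr_10724d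
    have hz : (0#32).toInt = 0 := by decide
    rw [hz] at hbr_10724d
    omega
  · -- at the head of the saving loop with `(i, j) = (0, 0)`
    refine ReachVia.done ?_
    generalize hln : Word.part .w32 (u.reg .rsi) = ln at *
    generalize hrt : Word.part .w32 (u.reg .rcx) = rt at *
    have hfp' : FinishPre (stb_vorbis.blocksize_1 u.mem f) ln.toInt (s32 (u.reg .rdx)) rt.toInt := by
      rw [← hln, ← hrt]
      exact hfp
    -- the segment's own stores: two stack slots and the field `previous_length`
    have hst : Mem.SameExcept [⟨(u.reg .rsp).toNat - 144, (u.reg .rsp).toNat⟩, ⟨f + 1256, f + 1260⟩] s.mem s_107255.mem := by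
      rw [w_mem]
      u_same
    have hun1 : ShadowUntouched s.mem s_107255.mem := by v_untouched
    -- `*f` outside `previous_length` reads as before the segment
    have hstep : ObjEq [(0, 1256), (1260, 1808)] s.mem f s_107255.mem f := by
      apply ObjEq.of_sameExcept hst
      · intro w hwm
        simp only [List.mem_cons, List.mem_nil_iff, or_false] at hwm
        rcases hwm with rfl | rfl <;> simp only [] <;> omega
      · intro w hwm sp hmem
        simp only [List.mem_cons, List.mem_nil_iff, or_false] at hwm hmem
        rcases hmem with rfl | rfl <;> rcases hwm with rfl | rfl <;> simp only [] <;> omega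
    have hobjN : ObjEq [(0, 1256), (1260, 1808)] u.mem f s_107255.mem f :=
      ObjEq.trans (hobj.sub (by decide)) hstep
    -- the new `previous_length` is `len − right`
    have hdiff := hfp'.prev_len
    have hd3 := ((Real.VorbisOK.config hinv0.fb.vorbis).header.HD3).toMdct
    have hb1e := hd3.blocksize_1_eq
    have hb1le : stb_vorbis.blocksize_1 u.mem f ≤ 8192 := by
      have hb1 := hd3.blocksize_1_eq
      have hle := hd3.b1.facts
      omega
    have hplN : stb_vorbis.previous_length s_107255.mem f = ln.toInt - rt.toInt := by
      simp only [vacc, voff]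
      unfold Mem.i32 Mem.u32
      rw [← addr_add_lit]
      have hrd : s_107255.mem.readLE (addr f + 1256) 4 = (ln - rt).toNat := by
        u_resolve
        have hlt : (ln - rt).toNat < 2 ^ 32 := (ln - rt).isLt
        omega
      rw [hrd, Vorbis.Spec.vorbis_finish_frame_3.seg3_sint32_toNat]
      exact Vorbis.Spec.vorbis_finish_frame_3.seg3_toInt_sub ln rt (by omega) (by omega)
    -- M7 again, for the new `previous_length`
    have hbs : bsize s_107255.mem f 1 = bsize u.mem f 1 := (Mdct.ReadsEq.of_objEq (hobjN.sub (by decide))).bsize 1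
    have h7 : Mdct.M7Range s_107255.mem f := by
      apply Mdct.M7Range.of_finish hplN
      · have h1 := hfp'.left_nonneg
        have h2 := hfp'.left_len
        omega
      · rw [hbs, ← hb1e]
        exact hfp'.right_b1
      · rw [hbs]
        have := hfp'.overlap
        omega
    -- the invariant in the new memory
    have hinvN : DecodeInv others frames len A stored room ysz s_107255.mem f := by
      apply Vorbis.Spec.vorbis_finish_frame.ff_inv_step hinv hst _ _ hun1 h7
      · intro sp hmem
        simp only [List.mem_cons, List.mem_nil_iff, or_false] at hmem
        rcases hmem with rfl | rfl
        · apply StoreOK.off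
          intro B hB
          have := hinv.offStack B hB
          simp only []
          omega
        · apply StoreOK.hole
          unfold InHole
          simp only []
          omega
      · intro sp hmem
        simp only [List.mem_cons, List.mem_nil_iff, or_false] at hmem
        rcases hmem with rfl | rfl <;> simp only [] <;> omega
    -- the footprint so far
    have hsameN : Mem.SameExcept [⟨(u.reg .rsp).toNat - 144, (u.reg .rsp).toNat⟩, ⟨A.B, A.B + A.L⟩] u.mem s_107255.mem := by
      apply hsame.trans
      apply hst.mono
      intro sp hmem
      simp only [List.mem_cons, List.mem_nil_iff, or_false] at hmem
      rcases hmem with rfl | rfl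
      · intro a ha1 ha2
        exact ⟨_, List.mem_cons_self, ha1, ha2⟩
      · intro a ha1 ha2
        simp only [] at ha1 ha2
        refine ⟨_, List.mem_cons_of_mem _ List.mem_cons_self, ?_, ?_⟩
        · simp only []
          omega
        · simp only []
          omega
    have hplu : u.mem.readLE (addr f + 1256) 4 = pl := by
      have hrd0 := hobj.readLE 1256 4 (by decide)
      rw [← addr_add_lit, rpl] at hrd0
      exact hrd0.symm
    have hpllt : pl < 2 ^ 32 := by
      rw [← rpl]
      exact X86.User.Mem.readLE_lt' _ _ 4
    refine ⟨w_rip, ⟨he0, hr, hsh, hinv0, hfp, w_rsp, ?rbx, w_eq, ?abi, ?_, ?_, ?_, ?_, ?_, ?_, ?_, ?_, ?_, ?_, hsameN,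
      Mem.EqOn.trans hun hun1, hacc⟩, w_r14, w_r13, ?ilt, Or.inl rfl, ?prev, hinvN, hobjN⟩
    case rbx =>
      rw [w_kept.get .rbx rfl]
      exact j_rbx
    case abi => v_inv
    case ilt =>
      have h1 := (Real.VorbisOK.config hinv0.fb.vorbis).header.HD1.1
      omega
    case prev =>
      rw [hplu]
      u_resolve
      rw [BitVec.toNat_ofNat]
      omega
    all_goals u_resolve
    · -- `[rsp] = len`
      rw [hln]
    · -- `[rsp + 4] = right`
      rw [hrt]
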